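-- pv_equiv track=rewrite | github.com/corozco7/Queens_Attack | Queen_Attack.py | up_right
-- ===== SOURCE A (Python) =====
-- def up_right(queen_position, board_length, obstacles):
-- 	"""Returns the amount of squares that the queen can move to the right diagonal up, stop counting when an obstacle is found."""
-- 	count = 0
-- 	rq = queen_position[0] + 1
-- 	cq = queen_position[1] + 1
-- 	while rq <= board_length and cq <= board_length:
-- 		if _isObstacles(rq, cq, obstacles):
-- 			rq += 1
-- 			cq += 1
-- 			count += 1
-- 		else:
-- 			break
-- 	return count
--
-- def _isObstacles(rq, cq, obstacles):
-- 	"""Validate if an obstacle is found"""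
-- 	var = True
-- 	compare = [rq, cq]
-- 	for x in obstacles:
-- 		if compare == x:
-- 			var = False
-- 			break
-- 	return var
-- ===== SOURCE B (Python) =====
-- def up_right(queen_position, board_length, obstacles):
--     """Returns the amount of squares that the queen can move to the right diagonal up, stop counting when an obstacle is found."""
--     r = queen_position[0]
--     c = queen_position[1]
--     edge = board_length - max(r, c)
--     if edge <= 0:
--         return 0
--     best = edge
--     for x in obstacles:
--         if len(x) == 2 and x[0] - r == x[1] - c and x[0] > r:
--             d = x[0] - r - 1
--             if d < best:
--                 best = d
--     return best
-- ===== Notes on version B (the rewrite author's own statement) =====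
-- stated objective: faster
-- what changed: Instead of walking the diagonal square by square and rescanning the obstacle list at every step, B computes the distance to the board edge in O(1) and makes a single pass over the obstacles taking the minimum distance-minus-one of obstacles lying ahead on the up-right diagonal.
import Mathlib
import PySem

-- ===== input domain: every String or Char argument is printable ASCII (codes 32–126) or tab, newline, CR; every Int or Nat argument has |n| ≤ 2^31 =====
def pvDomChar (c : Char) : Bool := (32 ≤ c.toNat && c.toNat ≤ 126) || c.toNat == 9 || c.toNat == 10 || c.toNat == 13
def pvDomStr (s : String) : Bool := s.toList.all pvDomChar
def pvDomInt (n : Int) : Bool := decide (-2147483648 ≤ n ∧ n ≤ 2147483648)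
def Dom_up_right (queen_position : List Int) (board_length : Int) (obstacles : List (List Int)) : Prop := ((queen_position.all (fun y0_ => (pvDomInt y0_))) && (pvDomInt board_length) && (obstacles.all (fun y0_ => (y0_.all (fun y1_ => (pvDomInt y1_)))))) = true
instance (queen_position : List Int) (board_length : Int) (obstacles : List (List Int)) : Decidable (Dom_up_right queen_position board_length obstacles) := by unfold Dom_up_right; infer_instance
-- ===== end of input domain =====

-- B replaces A's square-by-square diagonal walk (rescanning the obstacle list each step)
-- by one O(obstacles) pass taking the minimum distance to an obstacle ahead on the diagonal, clamped at the edge.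

-- ===== PORT A =====
-- _isObstacles: returns true while NO obstacle equals [rq, cq] (early break on match)
def isObstaclesA (rq cq : Int) : List (List Int) → Bool
  | [] => true
  | x :: rest => if ([rq, cq] : List Int) = x then false else isObstaclesA rq cq rest

-- the while loop of A
def upRightLoop (board_length : Int) (obstacles : List (List Int)) (rq cq count : Int) : Int :=
  if rq ≤ board_length ∧ cq ≤ board_length then
    if isObstaclesA rq cq obstacles then
      upRightLoop board_length obstacles (rq + 1) (cq + 1) (count + 1)
    else count
  else count
termination_by (board_length + 1 - rq).toNat
decreasing_by omega

def up_right (queen_position : List Int) (board_length : Int) (obstacles : List (List Int)) : Int :=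
  match queen_position with
  | q0 :: q1 :: _ => upRightLoop board_length obstacles (q0 + 1) (q1 + 1) 0
  | _ => 0  -- unreachable under Pre_up_right (Python raises IndexError)

-- ===== PORT B =====
-- the for loop of B: fold min of (x[0]-r-1) over obstacles ahead on the diagonal
def altScan (r c : Int) : List (List Int) → Int → Int
  | [], best => best
  | x :: rest, best =>
    match x with
    | [] => altScan r c rest best
    | a :: xs =>
      match xs with
      | [] => altScan r c rest best
      | b :: ys =>
        if ys = [] ∧ a - r = b - c ∧ a > r then
          altScan r c rest (if a - r - 1 < best then a - r - 1 else best)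
        else altScan r c rest best

def up_right_alt (queen_position : List Int) (board_length : Int) (obstacles : List (List Int)) : Int :=
  match PySem.List.pyGet? queen_position 0, PySem.List.pyGet? queen_position 1 with
  | some r, some c =>
    let edge := board_length - max r c
    if edge ≤ 0 then 0 else altScan r c obstacles edge
  | _, _ => 0  -- unreachable under Pre_up_right (Python raises IndexError)

-- ===== PRECONDITION & SPEC =====
-- Pre_ excludes exactly the inputs where A raises IndexError: queen_position shorter than 2.
def Pre_up_right (queen_position : List Int) (board_length : Int) (obstacles : List (List Int)) : Prop :=
  2 ≤ queen_position.length
instance (queen_position : List Int) (board_length : Int) (obstacles : List (List Int)) : Decidable (Pre_up_right queen_position board_length obstacles) := by unfold Pre_up_right; infer_instance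

def pvWitness_up_right : List Int × Int × List (List Int) := ([2, 3], 8, [[5, 6], [1, 1]])

def Spec_up_right (queen_position : List Int) (board_length : Int) (obstacles : List (List Int)) (out : Int) : Prop := out = up_right_alt queen_position board_length obstacles
instance (queen_position : List Int) (board_length : Int) (obstacles : List (List Int)) (out : Int) : Decidable (Spec_up_right queen_position board_length obstacles out) := by unfold Spec_up_right; infer_instance

-- ===== CLAIM (what is proved, stated in full; the proofs are below) =====
def Claim_equal_up_right : Prop := ∀ (queen_position : List Int) (board_length : Int) (obstacles : List (List Int)), Dom_up_right queen_position board_length obstacles → Pre_up_right queen_position board_length obstacles → Spec_up_right queen_position board_length obstacles (up_right queen_position board_length obstacles)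

-- ===== LEMMAS AND PROOFS =====

-- minimum distance-minus-one to an obstacle strictly ahead on the diagonal, as an Option
def mOpt (r c : Int) : List (List Int) → Option Int
  | [] => none
  | x :: rest =>
    match x with
    | [] => mOpt r c rest
    | a :: xs =>
      match xs with
      | [] => mOpt r c rest
      | b :: ys =>
        if ys = [] ∧ a - r = b - c ∧ a > r then
          some (match mOpt r c rest with
                | none => a - r - 1
                | some m => min (a - r - 1) m)
        else mOpt r c rest

theorem mOpt_nonneg (r c : Int) (obs : List (List Int)) (m : Int) (h : mOpt r c obs = some m) : 0 ≤ m := by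
  induction obs generalizing m with
  | nil => simp [mOpt] at h
  | cons x rest ih =>
    rcases x with _ | ⟨a, _ | ⟨b, ys⟩⟩
    · simp only [mOpt] at h; exact ih m h
    · simp only [mOpt] at h; exact ih m h
    · by_cases hc : ys = ([] : List Int) ∧ a - r = b - c ∧ a > r
      · simp only [mOpt, if_pos hc] at h
        cases hr : mOpt r c rest with
        | none => rw [hr] at h; simp at h; omega
        | some m' => rw [hr] at h; simp at h; have := ih m' hr; omega
      · simp only [mOpt, if_neg hc] at h; exact ih m h

theorem altScan_eq (r c : Int) (obs : List (List Int)) (best : Int) :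
    altScan r c obs best = match mOpt r c obs with
      | none => best
      | some m => min best m := by
  induction obs generalizing best with
  | nil => simp [altScan, mOpt]
  | cons x rest ih =>
    rcases x with _ | ⟨a, _ | ⟨b, ys⟩⟩
    · simp only [altScan, mOpt, ih]
    · simp only [altScan, mOpt, ih]
    · by_cases hc : ys = ([] : List Int) ∧ a - r = b - c ∧ a > r
      · simp only [altScan, mOpt, if_pos hc, ih]
        cases hr : mOpt r c rest with
        | none => simp only [min_def]; split_ifs <;> omega
        | some m => simp only [min_def]; split_ifs <;> omega
      · simp only [altScan, mOpt, if_neg hc, ih]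

theorem isObstaclesA_mem (rq cq : Int) (obs : List (List Int)) :
    isObstaclesA rq cq obs = true ↔ ([rq, cq] : List Int) ∉ obs := by
  induction obs with
  | nil => simp [isObstaclesA]
  | cons x rest ih =>
    by_cases hx : ([rq, cq] : List Int) = x
    · simp [isObstaclesA, hx]
    · simp [isObstaclesA, hx, ih]

-- if mOpt is some 0 then the immediate diagonal neighbour is an obstacle
theorem mOpt_zero_mem (r c : Int) (obs : List (List Int)) (h : mOpt r c obs = some 0) :
    ([r + 1, c + 1] : List Int) ∈ obs := by
  induction obs with
  | nil => simp [mOpt] at h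
  | cons x rest ih =>
    rcases x with _ | ⟨a, _ | ⟨b, ys⟩⟩
    · simp only [mOpt] at h; exact List.mem_cons_of_mem _ (ih h)
    · simp only [mOpt] at h; exact List.mem_cons_of_mem _ (ih h)
    · by_cases hc : ys = ([] : List Int) ∧ a - r = b - c ∧ a > r
      · obtain ⟨hys, hab, har⟩ := hc
        simp only [mOpt, if_pos (⟨hys, hab, har⟩ : ys = ([] : List Int) ∧ a - r = b - c ∧ a > r)] at h
        subst hys
        cases hr : mOpt r c rest with
        | none =>
          rw [hr] at h; simp at h
          have ha : a = r + 1 := by omega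
          have hb : b = c + 1 := by omega
          subst ha; subst hb; simp
        | some m =>
          rw [hr] at h; simp at h
          have hm := mOpt_nonneg r c rest m hr
          by_cases hd : a - r - 1 = 0
          · have ha : a = r + 1 := by omega
            have hb : b = c + 1 := by omega
            subst ha; subst hb; simp
          · have hmz : m = 0 := by omega
            subst hmz
            exact List.mem_cons_of_mem _ (ih hr)
      · simp only [mOpt, if_neg hc] at h
        exact List.mem_cons_of_mem _ (ih h)

-- if the immediate neighbour is an obstacle, mOpt gives some m ≤ 0
theorem mem_mOpt_le (r c : Int) (obs : List (List Int)) (h : ([r + 1, c + 1] : List Int) ∈ obs) :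
    ∃ m, mOpt r c obs = some m ∧ m ≤ 0 := by
  induction obs with
  | nil => simp at h
  | cons x rest ih =>
    rcases List.mem_cons.mp h with heq | hmem
    · rcases x with _ | ⟨a, _ | ⟨b, ys⟩⟩
      · simp at heq
      · simp at heq
      · have ha : a = r + 1 := by have := heq; simp at this; omega
        have hb : b = c + 1 := by have := heq; simp at this; tauto
        have hys : ys = ([] : List Int) := by have := heq; simp at this; tauto
        subst ha; subst hb
        have hc : ys = ([] : List Int) ∧ (r + 1) - r = (c + 1) - c ∧ (r + 1) > r :=
          ⟨hys, by omega, by omega⟩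
        simp only [mOpt, if_pos hc]
        cases hr : mOpt r c rest with
        | none => refine ⟨_, rfl, ?_⟩; simp only []; omega
        | some m =>
          refine ⟨_, rfl, ?_⟩
          have := mOpt_nonneg r c rest m hr
          simp only [min_def]
          split_ifs <;> omega
    · rcases ih hmem with ⟨m, hm, hm0⟩
      rcases x with _ | ⟨a, _ | ⟨b, ys⟩⟩
      · exact ⟨m, by simp only [mOpt]; exact hm, hm0⟩
      · exact ⟨m, by simp only [mOpt]; exact hm, hm0⟩
      · by_cases hc : ys = ([] : List Int) ∧ a - r = b - c ∧ a > r
        · simp only [mOpt, if_pos hc, hm]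
          exact ⟨_, rfl, by have := mOpt_nonneg r c rest m hm; simp only [min_def]; split_ifs <;> omega⟩
        · simp only [mOpt, if_neg hc]
          exact ⟨m, hm, hm0⟩

-- shifting the start one step along the diagonal when the immediate neighbour is free
theorem mOpt_shift (r c : Int) (obs : List (List Int)) (hfree : ([r + 1, c + 1] : List Int) ∉ obs) :
    mOpt (r + 1) (c + 1) obs = (mOpt r c obs).map (· - 1) := by
  induction obs with
  | nil => simp [mOpt]
  | cons x rest ih =>
    have hfree' : ([r + 1, c + 1] : List Int) ∉ rest := fun h => hfree (List.mem_cons_of_mem _ h)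
    have ih' := ih hfree'
    rcases x with _ | ⟨a, _ | ⟨b, ys⟩⟩
    · simp only [mOpt, ih']
    · simp only [mOpt, ih']
    · have hxne : ([r + 1, c + 1] : List Int) ≠ a :: b :: ys := fun h => hfree (h ▸ List.mem_cons_self ..)
      by_cases hc : ys = ([] : List Int) ∧ a - r = b - c ∧ a > r
      · have hc' : ys = ([] : List Int) ∧ a - (r + 1) = b - (c + 1) ∧ a > r + 1 := by
          refine ⟨hc.1, by omega, ?_⟩
          rcases hc with ⟨hys, h1, h2⟩
          by_contra hle
          have ha : a = r + 1 := by omega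
          have hb : b = c + 1 := by omega
          exact hxne (by rw [ha, hb, hys])
        simp only [mOpt, if_pos hc, if_pos hc', ih']
        cases hr : mOpt r c rest with
        | none =>
          show some (a - (r + 1) - 1) = some (a - r - 1 - 1)
          exact congrArg some (by ring)
        | some m =>
          show some (min (a - (r + 1) - 1) (m - 1)) = some (min (a - r - 1) m - 1)
          refine congrArg some ?_
          rw [min_def, min_def]
          split_ifs <;> (first | ring1 | linarith)
      · by_cases hc' : ys = ([] : List Int) ∧ a - (r + 1) = b - (c + 1) ∧ a > r + 1
        · exact absurd ⟨hc'.1, by omega, by omega⟩ hc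
        · simp only [mOpt, if_neg hc, if_neg hc', ih']

-- main loop characterisation
theorem loop_eq (L : Int) (obs : List (List Int)) :
    ∀ (n : Nat) (r c count : Int), (L - max r c).toNat = n →
      upRightLoop L obs (r + 1) (c + 1) count =
        count + (if L - max r c ≤ 0 then 0
                 else altScan r c obs (L - max r c)) := by
  intro n
  induction n with
  | zero =>
    intro r c count hn
    have hedge : L - max r c ≤ 0 := by omega
    rw [upRightLoop]
    have hcond : ¬(r + 1 ≤ L ∧ c + 1 ≤ L) := by omega
    rw [if_neg hcond, if_pos hedge]
    omega
  | succ n ih =>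
    intro r c count hn
    have hedge : 0 < L - max r c := by omega
    rw [upRightLoop]
    have hcond : (r + 1 ≤ L ∧ c + 1 ≤ L) := by omega
    rw [if_pos hcond, if_neg (by omega : ¬ L - max r c ≤ 0)]
    by_cases hfree : isObstaclesA (r + 1) (c + 1) obs = true
    · rw [if_pos hfree]
      have hnm : ([r + 1, c + 1] : List Int) ∉ obs := (isObstaclesA_mem _ _ _).mp hfree
      have hrec := ih (r + 1) (c + 1) (count + 1) (by rw [max_add_add_right r c 1]; omega)
      rw [hrec]
      rw [altScan_eq, altScan_eq, mOpt_shift r c obs hnm]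
      rw [max_add_add_right r c 1]
      have h1 : r ≤ max r c := le_max_left r c
      have h2 : c ≤ max r c := le_max_right r c
      cases hr : mOpt r c obs with
      | none =>
        show count + 1 + (if L - (max r c + 1) ≤ 0 then 0 else L - (max r c + 1)) =
          count + (L - max r c)
        generalize max r c = M at hedge h1 h2 ⊢
        split_ifs <;> linarith
      | some m =>
        have hm0 : 0 ≤ m := mOpt_nonneg r c obs m hr
        have hmne : m ≠ 0 := fun h0 => hnm (mOpt_zero_mem r c obs (h0 ▸ hr))
        have hmpos : 0 < m := lt_of_le_of_ne hm0 (Ne.symm hmne)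
        have hm1 : 1 ≤ m := by have := Int.add_one_le_iff.mpr hmpos; linarith
        show count + 1 + (if L - (max r c + 1) ≤ 0 then 0 else min (L - (max r c + 1)) (m - 1)) =
          count + min (L - max r c) m
        generalize max r c = M at hedge h1 h2 ⊢
        simp only [min_def]
        split_ifs <;> (first | ring1 | linarith)
    · rw [if_neg hfree]
      have hmem : ([r + 1, c + 1] : List Int) ∈ obs := by
        by_contra hnm
        exact hfree ((isObstaclesA_mem _ _ _).mpr hnm)
      rcases mem_mOpt_le r c obs hmem with ⟨m, hm, hm0⟩
      have hm1 : 0 ≤ m := mOpt_nonneg r c obs m hm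
      have hmz : m = 0 := le_antisymm hm0 hm1
      rw [altScan_eq, hm]
      subst hmz
      show count = count + min (L - max r c) 0
      generalize max r c = M at hedge ⊢
      rw [min_def]
      split_ifs <;> linarith

-- ===== VERDICT (by name: the statement is the Claim_ definition above) =====
theorem up_right_alt_cons (r c : Int) (t : List Int) (L : Int) (obs : List (List Int)) :
    up_right_alt (r :: c :: t) L obs =
      if L - max r c ≤ 0 then 0 else altScan r c obs (L - max r c) := by
  simp [up_right_alt, PySem.List.pyGet?, PySem.List.pyIdx?,
    show (0:Int) ≤ (t.length:Int) + 1 from by positivity]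

theorem up_right_spec : Claim_equal_up_right := by
  intro qp L obs _hdom hpre
  unfold Spec_up_right
  match qp, hpre with
  | r :: c :: t, _ =>
    show upRightLoop L obs (r + 1) (c + 1) 0 = up_right_alt (r :: c :: t) L obs
    rw [loop_eq L obs (L - max r c).toNat r c 0 rfl, up_right_alt_cons]
    split_ifs <;> simp_all
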